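-- pv_equiv track=rewrite | github.com/AP-MI-2021/lab-4-stefanagiosan | main.py | nr_pozitive_in_ordine_cresc
-- ===== SOURCE A (Python) =====
-- def nr_pozitive_in_ordine_cresc(l):
--     '''
--     Se creeaza o lista noua doar cu numerele pozitive, iar apoi se verifica daca toate din noua lista sunt in ordine crescatoare
--     :param l: lista de nr intregi din care se iau numerele pozitive
--     :return: True, daca numerele pozitive sunt ordonate crescator, iar False in caz contrar
--     '''
--
--     pozitive = []
--     for x in l:
--         if x >= 0:
--             pozitive.append(x)
--
--     if pozitive == []:
--         return False
--     else:
--         length = len(pozitive)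
--         for i in range(length - 1):
--             t=pozitive[i+1] - pozitive[i]
--             if t < 0:
--                 return False
--         return True
-- ===== SOURCE B (Python) =====
-- def nr_pozitive_in_ordine_cresc(l):
--     """Single pass: track the last positive value seen and whether any was seen."""
--     last = 0
--     seen = False
--     for x in l:
--         if x >= 0:
--             if seen and x < last:
--                 return False
--             last = x
--             seen = True
--     return seen
-- ===== Notes on version B (the rewrite author's own statement) =====
-- stated objective: simpler
-- what changed: Fuses A's two phases (build a filtered list of positives, then scan adjacent differences by index) into one single pass carrying only the last positive value and a seen flag, with no intermediate list.
import Mathlib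
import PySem

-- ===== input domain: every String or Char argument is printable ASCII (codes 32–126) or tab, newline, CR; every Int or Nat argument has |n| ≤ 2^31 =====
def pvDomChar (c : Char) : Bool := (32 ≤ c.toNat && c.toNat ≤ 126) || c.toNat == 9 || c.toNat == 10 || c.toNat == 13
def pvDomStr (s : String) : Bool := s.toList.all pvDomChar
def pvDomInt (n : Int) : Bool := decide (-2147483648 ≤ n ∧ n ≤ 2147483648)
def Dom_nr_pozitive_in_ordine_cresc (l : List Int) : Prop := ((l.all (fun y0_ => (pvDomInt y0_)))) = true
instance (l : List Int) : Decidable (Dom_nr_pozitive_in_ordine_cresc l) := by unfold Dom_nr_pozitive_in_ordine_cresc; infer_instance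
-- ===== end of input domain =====

-- B fuses A's two phases (filter positives into a new list, then scan adjacent differences by index)
-- into one single pass carrying the last positive value and a seen flag; return value only.


-- ===== PORT A =====
def nr_pozitive_in_ordine_cresc (l : List Int) : Bool :=
  let pozitive := l.foldl (fun acc x => if x ≥ 0 then acc ++ [x] else acc) []
  if pozitive = [] then false
  else
    let length : Int := pozitive.length
    -- the 'for i in range(length-1)' loop with early return, as a fold with a Bool flag
    -- (once the flag is false it stays false, exactly the early return's value)
    (PySem.List.pyRange 0 (length - 1) 1).foldl
      (fun ok i =>
        ok && !(PySem.List.pyGetD pozitive (i + 1) 0 - PySem.List.pyGetD pozitive i 0 < 0))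
      true

-- ===== PORT B =====
def pvBLoop : List Int → Int → Bool → Bool
  | [], _, seen => seen
  | x :: xs, last, seen =>
    if x ≥ 0 then
      if seen && decide (x < last) then false else pvBLoop xs x true
    else pvBLoop xs last seen

def nr_pozitive_in_ordine_cresc_alt (l : List Int) : Bool :=
  pvBLoop l 0 false

-- ===== PRECONDITION & SPEC =====
def Spec_nr_pozitive_in_ordine_cresc (l : List Int) (out : Bool) : Prop := out = nr_pozitive_in_ordine_cresc_alt l
instance (l : List Int) (out : Bool) : Decidable (Spec_nr_pozitive_in_ordine_cresc l out) := by unfold Spec_nr_pozitive_in_ordine_cresc; infer_instance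

-- ===== CLAIM (what is proved, stated in full; the proofs are below) =====
def Claim_equal_nr_pozitive_in_ordine_cresc : Prop := ∀ (l : List Int), Dom_nr_pozitive_in_ordine_cresc l → Spec_nr_pozitive_in_ordine_cresc l (nr_pozitive_in_ordine_cresc l)

-- ===== LEMMAS AND PROOFS =====

-- B's loop after the first positive has been recorded, phrased on the filtered list
def pvG : List Int → Int → Bool
  | [], _ => true
  | x :: xs, last => if x < last then false else pvG xs x

-- A's filter loop builds exactly List.filter
theorem pvA_filter (l : List Int) (acc : List Int) :
    l.foldl (fun acc x => if x ≥ 0 then acc ++ [x] else acc) acc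
      = acc ++ l.filter (fun x => decide (x ≥ 0)) := by
  induction l generalizing acc with
  | nil => simp
  | cons x xs ih =>
    simp only [List.foldl_cons, List.filter_cons]
    by_cases h : x ≥ 0 <;> simp [h, ih]

-- a fold that only ever ANDs onto the flag is the flag AND an 'all'
theorem pvFoldl_and (g : Int → Bool) (r : List Int) (acc : Bool) :
    r.foldl (fun ok i => ok && g i) acc = (acc && r.all g) := by
  induction r generalizing acc with
  | nil => simp
  | cons i r ih => simp [List.foldl_cons, ih, Bool.and_assoc]

-- the adjacent-difference 'all' over range equals pvG on the tail
theorem pvRangeAll (xs : List Int) (x : Int) :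
    ((List.range xs.length).all
      (fun k => !((x :: xs).getD (k + 1) 0 - (x :: xs).getD k 0 < 0))) = pvG xs x := by
  induction xs generalizing x with
  | nil => simp [pvG]
  | cons y ys ih =>
    rw [show (y :: ys).length = ys.length + 1 from rfl, List.range_succ_eq_map]
    simp only [List.all_cons, List.all_map, Function.comp_def, Nat.succ_eq_add_one,
      List.getD_cons_succ, List.getD_cons_zero]
    have hf : (fun k => !decide (ys.getD k 0 - (y :: ys).getD k 0 < 0))
        = (fun k => !decide ((y :: ys).getD (k + 1) 0 - (y :: ys).getD k 0 < 0)) := by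
      funext k; simp
    rw [hf, ih y, pvG]
    by_cases h : y < x
    · simp [h, show y - x < 0 by omega]
    · simp [h, show ¬ y - x < 0 by omega]

-- B's loop result, phrased on the filtered list
def pvH (p : List Int) (last : Int) (seen : Bool) : Bool :=
  match p, seen with
  | [], s => s
  | x :: xs, true => if x < last then false else pvG xs x
  | _ :: xs, false => pvG xs (p.headI)

theorem pvH_true (p : List Int) (x : Int) : pvH p x true = pvG p x := by
  cases p <;> simp [pvH, pvG]

-- B's loop equals pvH on the filtered list
theorem pvBLoop_filter (l : List Int) (last : Int) (seen : Bool) :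
    pvBLoop l last seen = pvH (l.filter (fun x => decide (x ≥ 0))) last seen := by
  induction l generalizing last seen with
  | nil => simp [pvBLoop, pvH]
  | cons x xs ih =>
    simp only [pvBLoop, List.filter_cons]
    by_cases h : x ≥ 0
    · simp only [if_pos h, decide_eq_true h]
      cases seen with
      | false => rw [ih x true, pvH_true]; simp [pvH]
      | true =>
        by_cases hlt : x < last
        · simp [hlt, pvH]
        · rw [if_neg (by simp [hlt]), ih x true, pvH_true]
          simp [pvH, hlt]
    · simpa [h] using ih last seen

-- ===== VERDICT (by name: the statement is the Claim_ definition above) =====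
theorem nr_pozitive_in_ordine_cresc_spec : Claim_equal_nr_pozitive_in_ordine_cresc := by
  intro l _
  unfold Spec_nr_pozitive_in_ordine_cresc nr_pozitive_in_ordine_cresc nr_pozitive_in_ordine_cresc_alt
  rw [pvA_filter, List.nil_append, pvBLoop_filter]
  cases hp : l.filter (fun x => decide (x ≥ 0)) with
  | nil => simp [pvH]
  | cons x xs =>
    simp only [pvH]
    rw [if_neg (by simp), pvFoldl_and, Bool.true_and]
    rw [show ((x :: xs).length : Int) - 1 = ((xs.length : Nat) : Int) by
      simp only [List.length_cons]; push_cast; ring]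
    rw [PySem.List.pyRange_one]
    rw [show (((xs.length : Nat) : Int) - 0).toNat = xs.length by simp]
    rw [List.all_map]
    have hfun : ((fun i => !decide (PySem.List.pyGetD (x :: xs) (i + 1) 0
            - PySem.List.pyGetD (x :: xs) i 0 < 0)) ∘ fun k : Nat => 0 + (k : Int))
        = fun k : Nat => !decide ((x :: xs).getD (k + 1) 0 - (x :: xs).getD k 0 < 0) := by
      funext k
      simp only [Function.comp_apply, zero_add]
      rw [show ((k : Int) + 1) = (((k + 1 : Nat)) : Int) by push_cast; ring]
      rw [PySem.List.pyGetD_natCast, PySem.List.pyGetD_natCast]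
    rw [hfun]
    exact pvRangeAll xs x
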